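-- pv_equiv track=rewrite | github.com/doyedele1/algo-series | Questions/OA/Amazon/Get Minimum Days/solution.py | boxes
-- ===== SOURCE A (Python) =====
-- from collections import Counter
--
-- def boxes(weights):
--     counts = Counter(weights)
--     ans = 0
--     for k, v in counts.items():
--         if v %2 ==1 and v % 3==1:
--             return -1
--         else:
--             ans += v//3
--             ans += 1 if v % 3!=0 else 0
--     return ans
-- ===== SOURCE B (Python) =====
-- def boxes(weights):
--     ws = sorted(weights)
--     ans = 0
--     i = 0
--     n = len(ws)
--     while i < n:
--         j = i
--         while j < n and ws[j] == ws[i]: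
--             j += 1
--         v = j - i
--         if v % 2 == 1 and v % 3 == 1:
--             return -1
--         ans += v // 3
--         ans += 1 if v % 3 != 0 else 0
--         i = j
--     return ans
-- ===== Notes on version B (the rewrite author's own statement) =====
-- stated objective: alternative
-- what changed: Replaces the Counter hash-count plus dict-items loop by sort-then-scan: sort the weights once with sorted() and walk consecutive equal runs by index, applying the same per-frequency rule to each run length.
import Mathlib
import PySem

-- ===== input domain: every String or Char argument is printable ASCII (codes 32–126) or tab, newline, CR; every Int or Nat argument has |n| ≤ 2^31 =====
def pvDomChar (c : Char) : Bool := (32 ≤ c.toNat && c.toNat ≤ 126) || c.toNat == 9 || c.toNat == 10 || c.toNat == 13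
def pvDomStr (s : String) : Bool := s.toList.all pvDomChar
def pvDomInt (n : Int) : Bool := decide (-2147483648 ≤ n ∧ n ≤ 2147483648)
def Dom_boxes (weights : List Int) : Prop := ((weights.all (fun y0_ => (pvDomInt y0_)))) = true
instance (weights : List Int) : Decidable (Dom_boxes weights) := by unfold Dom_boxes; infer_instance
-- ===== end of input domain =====

-- B replaces A's Counter-then-items loop by sorting once and scanning consecutive equal
-- runs, applying the same per-frequency rule to each run length (objective: alternative).

-- ===== PORT A =====
-- for k, v in Counter(weights).items(): early return -1 / accumulate ans
def boxesLoopA (ans : Int) : List (Int × Int) → Int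
  | [] => ans
  | (_, v) :: rest =>
    if PySem.Int.mod v 2 == 1 && PySem.Int.mod v 3 == 1 then -1
    else boxesLoopA (ans + PySem.Int.floordiv v 3
            + (if PySem.Int.mod v 3 != 0 then 1 else 0)) rest

def boxes (weights : List Int) : Int :=
  boxesLoopA 0 (PySem.Dict.counter weights).items

-- ===== PORT B =====
-- scan of the sorted list: the inner `while ws[j] == ws[i]` measures the current run
-- (takeWhile); `i = j` skips past it (dropWhile); the outer while is this recursion
def boxesScanB (ans : Int) : List Int → Int
  | [] => ans
  | x :: rest =>
    let v : Int := 1 + (rest.takeWhile (fun y => y == x)).length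
    if PySem.Int.mod v 2 == 1 && PySem.Int.mod v 3 == 1 then -1
    else boxesScanB (ans + PySem.Int.floordiv v 3
            + (if PySem.Int.mod v 3 != 0 then 1 else 0)) (rest.dropWhile (fun y => y == x))
termination_by l => l.length
decreasing_by
  simp only [List.length_cons]
  exact Nat.lt_succ_of_le (List.length_dropWhile_le _ _)

def boxes_alt (weights : List Int) : Int :=
  boxesScanB 0 (PySem.List.sorted weights (fun x => x) false)

-- ===== PRECONDITION & SPEC =====
def Spec_boxes (weights : List Int) (out : Int) : Prop := out = boxes_alt weights
instance (weights : List Int) (out : Int) : Decidable (Spec_boxes weights out) := by unfold Spec_boxes; infer_instance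

-- ===== CLAIM (what is proved, stated in full; the proofs are below) =====
def Claim_equal_boxes : Prop := ∀ (weights : List Int), Dom_boxes weights → Spec_boxes weights (boxes weights)

-- ===== LEMMAS AND PROOFS =====

-- the distinct values of a (sorted) list, one per run, in run order
def runKeys : List Int → List Int
  | [] => []
  | x :: rest => x :: runKeys (rest.dropWhile (fun y => y == x))
termination_by l => l.length
decreasing_by
  simp only [List.length_cons]
  exact Nat.lt_succ_of_le (List.length_dropWhile_le _ _)

-- in a sorted list, the head never reappears after its leading run
lemma sorted_not_mem_dropWhile (x : Int) (rest : List Int)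
    (hs : (x :: rest).Pairwise (fun a b => a ≤ b)) :
    x ∉ rest.dropWhile (fun y => y == x) := by
  induction rest with
  | nil => simp
  | cons y t ih =>
    rcases List.pairwise_cons.mp hs with ⟨hx, hyt⟩
    by_cases h : (y == x) = true
    · rw [List.dropWhile_cons, if_pos h]
      exact ih (List.pairwise_cons.mpr ⟨fun z hz => hx z (List.mem_cons_of_mem _ hz),
        (List.pairwise_cons.mp hyt).2⟩)
    · rw [List.dropWhile_cons, if_neg h]
      intro hmem
      have hxy : x ≤ y := hx y (List.mem_cons_self)
      rcases List.mem_cons.mp hmem with rfl | hmt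
      · simp at h
      · have hyx : y ≤ x := (List.pairwise_cons.mp hyt).1 x hmt
        have : y = x := le_antisymm hyx hxy
        simp [this] at h

lemma mem_runKeys_iff (s : List Int) : ∀ k, k ∈ runKeys s ↔ k ∈ s := by
  induction hn : s.length using Nat.strong_induction_on generalizing s with
  | _ n ih =>
    cases s with
    | nil => simp [runKeys]
    | cons x rest =>
      intro k
      have hlen : (rest.dropWhile (fun y => y == x)).length < n := by
        have := List.length_dropWhile_le (fun y => y == x) rest
        simp only [List.length_cons] at hn
        omega
      rw [runKeys]
      constructor
      · intro hk
        rcases List.mem_cons.mp hk with rfl | hk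
        · exact List.mem_cons_self
        · have := (ih _ hlen _ rfl k).mp hk
          exact List.mem_cons_of_mem _ ((List.dropWhile_sublist _).mem this)
      · intro hk
        rcases List.mem_cons.mp hk with rfl | hk
        · exact List.mem_cons_self
        · by_cases hkx : k = x
          · exact hkx ▸ List.mem_cons_self
          · refine List.mem_cons_of_mem _ ((ih _ hlen _ rfl k).mpr ?_)
            -- k ∈ rest and k ≠ x, so k survives dropping the leading run of x's
            have hsplit := (List.takeWhile_append_dropWhile (p := fun y => y == x) (l := rest)).symm
            rw [hsplit] at hk
            rcases List.mem_append.mp hk with hkt | hkd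
            · have := List.mem_takeWhile_imp hkt
              simp at this
              exact absurd this hkx
            · exact hkd

lemma nodup_runKeys (s : List Int) (hs : s.Pairwise (fun a b => a ≤ b)) :
    (runKeys s).Nodup := by
  induction hn : s.length using Nat.strong_induction_on generalizing s with
  | _ n ih =>
    cases s with
    | nil => simp [runKeys]
    | cons x rest =>
      have hlen : (rest.dropWhile (fun y => y == x)).length < n := by
        have := List.length_dropWhile_le (fun y => y == x) rest
        simp only [List.length_cons] at hn
        omega
      have hd : (rest.dropWhile (fun y => y == x)).Pairwise (fun a b => a ≤ b) :=
        (List.Pairwise.sublist (List.dropWhile_sublist _) (List.pairwise_cons.mp hs).2)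
      rw [runKeys]
      refine List.nodup_cons.mpr ⟨?_, ih _ hlen _ hd rfl⟩
      intro hmem
      exact sorted_not_mem_dropWhile x rest hs
        ((mem_runKeys_iff _ x).mp hmem)

-- the leading run has exactly count-many elements, and other counts live in the tail
lemma count_head_run (x : Int) (rest : List Int)
    (hs : (x :: rest).Pairwise (fun a b => a ≤ b)) :
    ((x :: rest).count x : Int) = 1 + (rest.takeWhile (fun y => y == x)).length := by
  have hsplit := (List.takeWhile_append_dropWhile (p := fun y => y == x) (l := rest)).symm
  have htall : ∀ b ∈ rest.takeWhile (fun y => y == x), b = x := by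
    intro b hb
    have := List.mem_takeWhile_imp hb
    simpa using this
  have hct : (rest.takeWhile (fun y => y == x)).count x
      = (rest.takeWhile (fun y => y == x)).length :=
    List.count_eq_length.mpr (fun b hb => (htall b hb).symm ▸ rfl)
  have hcd : (rest.dropWhile (fun y => y == x)).count x = 0 :=
    List.count_eq_zero.mpr (sorted_not_mem_dropWhile x rest hs)
  have hrest : rest.count x = (rest.takeWhile (fun y => y == x)).length := by
    conv_lhs => rw [hsplit]
    rw [List.count_append, hct, hcd]
    omega
  rw [List.count_cons_self, hrest]
  push_cast
  ring

lemma count_tail_of_ne (x k : Int) (rest : List Int) (hkx : k ≠ x) :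
    (x :: rest).count k = (rest.dropWhile (fun y => y == x)).count k := by
  have hsplit := (List.takeWhile_append_dropWhile (p := fun y => y == x) (l := rest)).symm
  have hct : (rest.takeWhile (fun y => y == x)).count k = 0 := by
    refine List.count_eq_zero.mpr ?_
    intro hk
    have := List.mem_takeWhile_imp hk
    simp at this
    exact hkx this
  have h1 : (x :: rest).count k = rest.count k := by
    simp [Ne.symm hkx]
  have h2 : rest.count k
      = (rest.takeWhile (fun y => y == x)).count k
        + (rest.dropWhile (fun y => y == x)).count k := by
    conv_lhs => rw [hsplit]
    rw [List.count_append]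
  omega

-- B's scan over a sorted list IS A's items loop over the (value, count) pairs of the runs
lemma boxesScanB_eq_loopA (s : List Int) (hs : s.Pairwise (fun a b => a ≤ b)) (ans : Int) :
    boxesScanB ans s = boxesLoopA ans ((runKeys s).map (fun k => (k, (s.count k : Int)))) := by
  induction hn : s.length using Nat.strong_induction_on generalizing s ans with
  | _ n ih =>
    cases s with
    | nil => simp [boxesScanB, runKeys, boxesLoopA]
    | cons x rest =>
      have hlen : (rest.dropWhile (fun y => y == x)).length < n := by
        have := List.length_dropWhile_le (fun y => y == x) rest
        simp only [List.length_cons] at hn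
        omega
      have hd : (rest.dropWhile (fun y => y == x)).Pairwise (fun a b => a ≤ b) :=
        (List.Pairwise.sublist (List.dropWhile_sublist _) (List.pairwise_cons.mp hs).2)
      have hv : (1 + (rest.takeWhile (fun y => y == x)).length : Int)
          = ((x :: rest).count x : Int) := (count_head_run x rest hs).symm
      rw [runKeys, boxesScanB, List.map_cons, boxesLoopA]
      simp only [← hv]
      by_cases hb : (PySem.Int.mod (1 + ((rest.takeWhile fun y => y == x).length : Int)) 2 == 1
          && PySem.Int.mod (1 + ((rest.takeWhile fun y => y == x).length : Int)) 3 == 1) = true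
      · rw [if_pos hb, if_pos hb]
      · rw [if_neg hb, if_neg hb]
        rw [ih _ hlen _ hd _ rfl]
        congr 1
        refine List.map_congr_left ?_
        intro k hk
        have hkd : k ∈ rest.dropWhile (fun y => y == x) := (mem_runKeys_iff _ k).mp hk
        have hkx : k ≠ x := by
          intro h
          exact sorted_not_mem_dropWhile x rest hs (h ▸ hkd)
        rw [count_tail_of_ne x k rest hkx]

-- A's items loop, characterised as a short-circuit any / a sum
def pvBad (v : Int) : Bool := PySem.Int.mod v 2 == 1 && PySem.Int.mod v 3 == 1
def pvContrib (v : Int) : Int :=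
  PySem.Int.floordiv v 3 + (if PySem.Int.mod v 3 != 0 then 1 else 0)

lemma boxesLoopA_eq (L : List (Int × Int)) (ans : Int) :
    boxesLoopA ans L =
      if L.any (fun p => pvBad p.2) then -1
      else ans + (L.map (fun p => pvContrib p.2)).sum := by
  induction L generalizing ans with
  | nil => simp [boxesLoopA]
  | cons p rest ih =>
    obtain ⟨k, v⟩ := p
    have hcond : (PySem.Int.mod v 2 == 1 && PySem.Int.mod v 3 == 1) = pvBad v := rfl
    rw [boxesLoopA, hcond, List.any_cons, List.map_cons, List.sum_cons]
    cases hb : pvBad v with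
    | true => simp
    | false =>
      rw [ih]
      simp only [Bool.false_eq_true, if_false, Bool.false_or]
      by_cases ha : (rest.any (fun p => pvBad p.2)) = true
      · rw [if_pos ha, if_pos ha]
      · rw [if_neg ha, if_neg ha]
        unfold pvContrib
        ring

-- ===== VERDICT (by name: the statement is the Claim_ definition above) =====
theorem boxes_spec : Claim_equal_boxes := by
  intro weights _
  show boxes weights = boxes_alt weights
  set s := PySem.List.sorted weights (fun x => x) false with hsdef
  have hsp : s.Pairwise (fun a b => a ≤ b) := PySem.List.sorted_pairwise weights _
  have hperm : s.Perm weights := PySem.List.sorted_perm weights _ _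
  rw [boxes, boxes_alt, PySem.Dict.items_counter,
    boxesScanB_eq_loopA s hsp 0]
  -- the two pair lists are maps of permuted key lists carrying equal counts
  have hkeys : (runKeys s).Perm (PySem.Set.ofList weights) := by
    refine (List.perm_ext_iff_of_nodup (nodup_runKeys s hsp) (PySem.Set.nodup_ofList _)).mpr ?_
    intro k
    rw [mem_runKeys_iff, PySem.Set.mem_ofList, hperm.mem_iff]
  have hcnt : ∀ k, s.count k = weights.count k := fun k => hperm.count_eq k
  have hpairs : ((runKeys s).map (fun k => (k, (s.count k : Int)))).Perm
      ((PySem.Set.ofList weights).map (fun k => (k, (weights.count k : Int)))) := by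
    have : ((runKeys s).map (fun k => (k, (s.count k : Int))))
        = (runKeys s).map (fun k => (k, (weights.count k : Int))) := by
      refine List.map_congr_left ?_
      intro k _
      rw [hcnt k]
    rw [this]
    exact hkeys.map _
  rw [boxesLoopA_eq, boxesLoopA_eq, hpairs.any_eq, (hpairs.map _).sum_eq]
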